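-- pv_equiv track=rewrite | github.com/giyeon-dev/APS | 프로그래머스/1/138477. 명예의 전당 （1）/명예의 전당 （1）.py | solution
-- ===== SOURCE A (Python) =====
-- def solution(k, score):
--     ans = []
--
--     prize = []
--
--     for idx, n in enumerate(score):
--         if idx <= (k - 1):
--             prize.append(n)
--
--         elif idx > (k - 1) and score[idx] > min(prize):
--             prize.remove(min(prize))
--             prize.append(n)
--
--         ans.append(min(prize))
--
--     return ans
-- ===== SOURCE B (Python) =====
-- def _insert(top, n):
--     # insert n into ascending-sorted top, keeping it sorted (before equal elements)
--     for i, x in enumerate(top):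
--         if n <= x:
--             return top[:i] + [n] + top[i:]
--     return top + [n]
--
--
-- def solution(k, score):
--     ans = []
--     top = []  # ascending-sorted list of the (at most k) largest scores so far
--     for n in score:
--         top = _insert(top, n)
--         if len(top) > k:
--             top = top[1:]
--         ans.append(top[0])
--     return ans
-- ===== Notes on version B (the rewrite author's own statement) =====
-- stated objective: alternative
-- what changed: B keeps the current top-k in an ascending sorted list (sorted insert, drop the head on overflow, read the minimum at the head) instead of A's per-step min() scan plus remove() over an unsorted list.
-- outside the precondition, e.g. on solution(0, [1, 2]): A raises ValueError, B raises IndexError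
import Mathlib
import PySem

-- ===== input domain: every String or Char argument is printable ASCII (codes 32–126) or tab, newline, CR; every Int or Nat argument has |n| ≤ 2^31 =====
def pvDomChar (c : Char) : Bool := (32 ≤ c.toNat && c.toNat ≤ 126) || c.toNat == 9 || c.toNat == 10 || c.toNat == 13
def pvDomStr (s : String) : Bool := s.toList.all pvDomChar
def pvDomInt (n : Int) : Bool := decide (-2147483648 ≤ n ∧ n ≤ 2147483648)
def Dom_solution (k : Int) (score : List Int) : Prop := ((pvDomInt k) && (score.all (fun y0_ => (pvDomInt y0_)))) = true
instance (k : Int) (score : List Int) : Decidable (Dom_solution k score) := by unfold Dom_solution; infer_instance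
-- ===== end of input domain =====

-- B keeps the current top-k as an ascending sorted list (insert in place, drop the head on
-- overflow, read the minimum at the head) instead of A's min-scan + remove over an unsorted list.

-- ===== PORT A =====
-- loop of A: state (ans, prize), idx the enumerate counter; min(prize) on an empty prize
-- raises in Python (only reachable when k ≤ 0 and score ≠ []) — excluded by Pre_solution,
-- here .getD 0 stands in for the raising call.
def solution_go (k : Int) (score : List Int) (rest : List Int) (idx : Nat)
    (ans prize : List Int) : List Int :=
  match rest with
  | [] => ans
  | n :: rest' =>
    let prize' :=
      if (idx : Int) ≤ k - 1 then prize ++ [n]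
      else if (idx : Int) > k - 1 ∧
          (PySem.List.pyGet? score (idx : Int)).getD 0 > (PySem.List.min? prize (fun x => x)).getD 0 then
        (PySem.List.remove? prize ((PySem.List.min? prize (fun x => x)).getD 0)).getD prize ++ [n]
      else prize
    solution_go k score rest' (idx + 1) (ans ++ [(PySem.List.min? prize' (fun x => x)).getD 0]) prize'

def solution (k : Int) (score : List Int) : List Int :=
  solution_go k score score 0 [] []

-- ===== PORT B =====
-- _insert of Source B: front scan, place n before the first element it is ≤.
def insTop (n : Int) : List Int → List Int
  | [] => [n]
  | x :: t => if n ≤ x then n :: x :: t else x :: insTop n t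

-- loop of B: top[1:] is PySem.List.slice with (some 1) none; top[0] raises in Python only
-- when k ≤ 0 (excluded by Pre_solution), here .headD 0 stands in for it.
def solution_alt_go (k : Int) (rest ans top : List Int) : List Int :=
  match rest with
  | [] => ans
  | n :: rest' =>
    let t1 := insTop n top
    let t2 := if k < (t1.length : Int) then PySem.List.slice t1 (some 1) none else t1
    solution_alt_go k rest' (ans ++ [t2.headD 0]) t2

def solution_alt (k : Int) (score : List Int) : List Int :=
  solution_alt_go k score [] []

-- ===== PRECONDITION & SPEC =====
-- Pre_ excludes k ≤ 0 with a nonempty score: there Python A raises ValueError (min of empty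
-- sequence) and Python B raises IndexError; both return normally everywhere else.
def Pre_solution (k : Int) (score : List Int) : Prop := score = [] ∨ 1 ≤ k
instance (k : Int) (score : List Int) : Decidable (Pre_solution k score) := by
  unfold Pre_solution; infer_instance

def pvWitness_solution : Int × List Int := (3, [10, 100, 20, 150, 1, 100, 200])

def Spec_solution (k : Int) (score : List Int) (out : List Int) : Prop := out = solution_alt k score
instance (k : Int) (score : List Int) (out : List Int) : Decidable (Spec_solution k score out) := by
  unfold Spec_solution; infer_instance

-- ===== CLAIM (what is proved, stated in full; the proofs are below) =====
def Claim_equal_solution : Prop := ∀ (k : Int) (score : List Int), Dom_solution k score → Pre_solution k score → Spec_solution k score (solution k score)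

-- ===== LEMMAS AND PROOFS =====

theorem insTop_perm (n : Int) (l : List Int) : (insTop n l).Perm (n :: l) := by
  induction l with
  | nil => simp [insTop]
  | cons x t ih =>
    simp only [insTop]
    split
    · exact List.Perm.refl _
    · exact (List.Perm.cons x ih).trans (List.Perm.swap n x t)

theorem insTop_sorted (n : Int) (l : List Int) (h : l.Pairwise (· ≤ ·)) :
    (insTop n l).Pairwise (· ≤ ·) := by
  induction l with
  | nil => exact List.pairwise_singleton _ _
  | cons x t ih =>
    simp only [insTop]
    split
    · rename_i hle
      refine List.Pairwise.cons ?_ h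
      intro b hb
      rcases List.mem_cons.mp hb with rfl | hb
      · exact hle
      · exact le_trans hle (List.rel_of_pairwise_cons h hb)
    · rename_i hgt
      have hts := List.Pairwise.of_cons h
      refine List.Pairwise.cons ?_ (ih hts)
      intro b hb
      rcases List.mem_cons.mp ((insTop_perm n t).mem_iff.mp hb) with rfl | hb'
      · omega
      · exact List.rel_of_pairwise_cons h hb'

-- the minimum of any list permuted from a sorted h :: t is h
theorem min?_of_perm_sorted (l : List Int) (h : Int) (t : List Int)
    (hp : l.Perm (h :: t)) (hs : (h :: t).Pairwise (· ≤ ·)) :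
    PySem.List.min? l (fun x => x) = some h := by
  have hne : l ≠ [] := by
    intro rfl_; subst rfl_; exact absurd hp.symm (by simp)
  obtain ⟨m, hm⟩ : ∃ m, PySem.List.min? l (fun x => x) = some m := by
    cases hmin : PySem.List.min? l (fun x => x) with
    | none => exact absurd ((PySem.List.min?_eq_none_iff l _).mp hmin) hne
    | some m => exact ⟨m, rfl⟩
  have hmem : m ∈ l := PySem.List.min?_mem hm
  have hmemht : m ∈ h :: t := hp.mem_iff.mp hmem
  have h_le_m : h ≤ m := by
    rcases List.mem_cons.mp hmemht with rfl | hb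
    · exact le_refl _
    · exact List.rel_of_pairwise_cons hs hb
  have hh_in_l : h ∈ l := hp.mem_iff.mpr (List.mem_cons_self)
  have m_le_h : m ≤ h := PySem.List.min?_isMin hm h hh_in_l
  rw [hm]
  exact congrArg some (le_antisymm m_le_h h_le_m)

-- main loop invariant: A's prize is a permutation of B's sorted top, and top has
-- min(idx, k) elements; then both loops extend ans identically.
theorem go_eq (k : Int) (score : List Int) (hk : 1 ≤ k) :
    ∀ (rest : List Int) (idx : Nat) (ans prize top : List Int),
      score.drop idx = rest →
      prize.Perm top →
      top.Pairwise (· ≤ ·) →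
      (top.length : Int) = min (idx : Int) k →
      solution_go k score rest idx ans prize = solution_alt_go k rest ans top := by
  intro rest
  induction rest with
  | nil => intro idx ans prize top _ _ _ _; simp [solution_go, solution_alt_go]
  | cons n rest' ih =>
    intro idx ans prize top hdrop hperm hsorted hlen
    have hidx_lt : idx < score.length := by
      by_contra hge
      have : score.drop idx = [] := List.drop_eq_nil_of_le (by omega)
      rw [this] at hdrop; exact (List.cons_ne_nil n rest') hdrop.symm
    have hget : PySem.List.pyGet? score (idx : Int) = some n := by
      rw [PySem.List.pyGet?_natCast]
      have : score[idx]? = (score.drop idx)[0]? := by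
        simp [List.getElem?_drop]
      rw [this, hdrop]; rfl
    have hdrop' : score.drop (idx + 1) = rest' := by
      have : score.drop (idx + 1) = (score.drop idx).drop 1 := by
        rw [List.drop_drop]
      rw [this, hdrop]; rfl
    simp only [solution_go, solution_alt_go]
    by_cases hphase : (idx : Int) ≤ k - 1
    · -- filling phase: append on both sides, no pop
      have hlen' : (top.length : Int) = (idx : Int) := by omega
      have ht1len : ((insTop n top).length : Int) = (idx : Int) + 1 := by
        have := (insTop_perm n top).length_eq
        simp at this; omega
      have hnopop : ¬ k < ((insTop n top).length : Int) := by omega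
      have hperm' : (prize ++ [n]).Perm (insTop n top) := by
        refine List.Perm.trans ?_ (insTop_perm n top).symm
        exact (List.perm_append_singleton n prize).trans (List.Perm.cons n hperm)
      have hsorted' := insTop_sorted n top hsorted
      obtain ⟨h1, t1, ht1⟩ : ∃ h1 t1, insTop n top = h1 :: t1 := by
        cases hcase : insTop n top with
        | nil => have := (insTop_perm n top).length_eq; rw [hcase] at this; simp at this
        | cons h1 t1 => exact ⟨h1, t1, rfl⟩
      have hmin : PySem.List.min? (prize ++ [n]) (fun x => x) = some h1 := by
        exact min?_of_perm_sorted _ _ _ (ht1 ▸ hperm') (ht1 ▸ hsorted')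
      rw [if_pos hphase, if_neg hnopop]
      rw [ih (idx + 1) _ _ _ hdrop' hperm' hsorted' (by push_cast; omega)]
      congr 1
      rw [hmin, ht1]
      rfl
    · -- full phase: top has exactly k ≥ 1 elements
      have hlenk : (top.length : Int) = k := by omega
      obtain ⟨h0, t0, ht0⟩ : ∃ h0 t0, top = h0 :: t0 := by
        cases top with
        | nil => simp at hlenk; omega
        | cons h0 t0 => exact ⟨h0, t0, rfl⟩
      subst ht0
      have hlent0 : (t0.length : Int) + 1 = k := by simp at hlenk; omega
      have hminp : PySem.List.min? prize (fun x => x) = some h0 :=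
        min?_of_perm_sorted _ _ _ hperm hsorted
      rw [if_neg hphase]
      by_cases hgt : n > h0
      · -- replace the minimum
        have hcond : (idx : Int) > k - 1 ∧
            (PySem.List.pyGet? score (idx : Int)).getD 0 >
              (PySem.List.min? prize (fun x => x)).getD 0 := by
          constructor
          · omega
          · rw [hget, hminp]; exact hgt
        rw [if_pos hcond]
        have hh0mem : h0 ∈ prize := hperm.mem_iff.mpr List.mem_cons_self
        rw [hminp]
        simp only [Option.getD_some]
        rw [PySem.List.remove?_eq_some_erase prize h0 hh0mem, Option.getD_some]
        -- B side: n > h0 so insTop walks past the head, then the head is popped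
        have hins : insTop n (h0 :: t0) = h0 :: insTop n t0 := by
          simp [insTop]; omega
        have ht1len : ((insTop n (h0 :: t0)).length : Int) = k + 1 := by
          have := (insTop_perm n (h0 :: t0)).length_eq
          simp at this ⊢; omega
        rw [if_pos (by omega)]
        rw [PySem.List.slice_from_one, hins]
        simp only [List.tail_cons]
        have hperm' : (prize.erase h0 ++ [n]).Perm (insTop n t0) := by
          refine List.Perm.trans ?_ (insTop_perm n t0).symm
          refine (List.perm_append_singleton n _).trans (List.Perm.cons n ?_)
          have := hperm.erase h0
          simpa using this
        have hsorted' : (insTop n t0).Pairwise (· ≤ ·) :=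
          insTop_sorted n t0 (List.Pairwise.of_cons hsorted)
        obtain ⟨h1, t1, ht1⟩ : ∃ h1 t1, insTop n t0 = h1 :: t1 := by
          cases hcase : insTop n t0 with
          | nil => have := (insTop_perm n t0).length_eq; rw [hcase] at this; simp at this
          | cons h1 t1 => exact ⟨h1, t1, rfl⟩
        have hlen' : ((insTop n t0).length : Int) = min ((idx : Nat) + 1 : Int) k := by
          have := (insTop_perm n t0).length_eq
          simp at this ⊢
          omega
        rw [ih (idx + 1) _ _ _ hdrop' hperm' hsorted' (by push_cast at hlen' ⊢; omega)]
        congr 1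
        rw [min?_of_perm_sorted _ _ _ (ht1 ▸ hperm') (ht1 ▸ hsorted'), ht1]
        rfl
      · -- n ≤ min: A keeps prize; B inserts n at the front and pops it right back
        have hcond : ¬ ((idx : Int) > k - 1 ∧
            (PySem.List.pyGet? score (idx : Int)).getD 0 >
              (PySem.List.min? prize (fun x => x)).getD 0) := by
          rw [hget, hminp]; push Not; intro _; simpa using hgt
        rw [if_neg hcond]
        have hins : insTop n (h0 :: t0) = n :: h0 :: t0 := by
          simp [insTop]; omega
        have ht1len : ((insTop n (h0 :: t0)).length : Int) = k + 1 := by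
          rw [hins]; simp at hlenk ⊢; omega
        rw [if_pos (by omega), PySem.List.slice_from_one, hins]
        simp only [List.tail_cons]
        rw [ih (idx + 1) _ _ _ hdrop' hperm hsorted (by push_cast; omega)]
        congr 1
        rw [hminp]
        rfl

-- ===== VERDICT (by name: the statement is the Claim_ definition above) =====
theorem solution_spec : Claim_equal_solution := by
  unfold Claim_equal_solution
  intro k score _ hpre
  unfold Spec_solution solution solution_alt
  rcases hpre with rfl | hk
  · simp [solution_go, solution_alt_go]
  · exact go_eq k score hk score 0 [] [] [] rfl (List.Perm.refl _) List.Pairwise.nil (by simp only [List.length_nil, Nat.cast_zero]; omega)
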